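-- pv_equiv track=rewrite | github.com/LiME-org/py-rt-model-inference | src/rt_model_inference/iterators.py | first_and_last_nonoutlier
-- ===== SOURCE A (Python) =====
-- from collections.abc import Iterable, Iterator, Sequence
--
-- def first_and_last_nonoutlier(
--     outlier_flags: Iterable[bool],
-- ) -> tuple[int | None, int | None]:
--     """Return the index of the first and the last non-outlier samples (if any),
--     as determined by the given sequence of outlier flags."""
--
--     first = None
--     last = None
--
--     for i, flagged in enumerate(outlier_flags):
--         if not flagged:
--             if first is None:
--                 first = i
--             last = i
--
--     return (first, last)
-- ===== SOURCE B (Python) =====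
-- def first_and_last_nonoutlier(outlier_flags):
--     """Return the index of the first and the last non-outlier samples (if any),
--     as determined by the given sequence of outlier flags."""
--     flags = list(outlier_flags)  # consume the iterable exactly once
--     n = len(flags)
--     first = None
--     for i in range(n):
--         if not flags[i]:
--             first = i
--             break
--     if first is None:
--         return (None, None)
--     last = n - 1
--     while flags[last]:
--         last -= 1
--     return (first, last)
-- ===== Notes on version B (the rewrite author's own statement) =====
-- stated objective: alternative
-- what changed: B materializes the flags once and then runs two independent early-exit directional searches (forward from the start for the first index, backward from the end for the last), instead of a single full pass threading running first/last scalars.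
import Mathlib
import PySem

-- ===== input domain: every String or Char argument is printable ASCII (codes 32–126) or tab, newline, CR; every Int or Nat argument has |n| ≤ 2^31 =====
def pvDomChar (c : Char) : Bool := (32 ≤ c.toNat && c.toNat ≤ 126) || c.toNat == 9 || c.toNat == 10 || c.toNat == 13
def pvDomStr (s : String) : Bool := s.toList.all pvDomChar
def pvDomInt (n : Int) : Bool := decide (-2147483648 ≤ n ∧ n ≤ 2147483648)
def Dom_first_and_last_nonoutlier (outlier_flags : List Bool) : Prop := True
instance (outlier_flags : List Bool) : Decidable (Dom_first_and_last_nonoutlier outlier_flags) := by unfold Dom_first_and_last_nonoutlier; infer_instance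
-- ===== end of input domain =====

-- B replaces A's single full pass with two independent early-exit directional searches (alternative decomposition, same worst-case cost).

-- ===== PORT A =====
-- A: single loop over enumerate, threading running `first`/`last` scalars.
def first_and_last_nonoutlier (outlier_flags : List Bool) : Option Int × Option Int :=
  (PySem.List.enumerate outlier_flags).foldl
    (fun s p =>
      if !p.2 then
        ((match s.1 with | none => some p.1 | some x => some x), some p.1)
      else s)
    (none, none)

-- ===== PORT B =====
-- forward search: `for i in range(n): if not flags[i]: first = i; break`
def pvFwdFalse : List Bool → Int → Option Int
  | [], _ => none
  | f :: rest, i => if !f then some i else pvFwdFalse rest (i + 1)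

-- backward search: `last = n - 1; while flags[last]: last -= 1` — walks the list
-- from its back, decrementing the index (hence the recursion on the reversed list).
def pvBwdFalse : List Bool → Int → Option Int
  | [], _ => none
  | f :: rest, j => if !f then some j else pvBwdFalse rest (j - 1)

def first_and_last_nonoutlier_alt (outlier_flags : List Bool) : Option Int × Option Int :=
  let n : Int := outlier_flags.length
  match pvFwdFalse outlier_flags 0 with
  | none => (none, none)
  | some first => (some first, pvBwdFalse outlier_flags.reverse (n - 1))

-- ===== PRECONDITION & SPEC =====
def Spec_first_and_last_nonoutlier (outlier_flags : List Bool) (out : Option Int × Option Int) : Prop := out = first_and_last_nonoutlier_alt outlier_flags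
instance (outlier_flags : List Bool) (out : Option Int × Option Int) : Decidable (Spec_first_and_last_nonoutlier outlier_flags out) := by unfold Spec_first_and_last_nonoutlier; infer_instance

-- ===== CLAIM (what is proved, stated in full; the proofs are below) =====
def Claim_equal_first_and_last_nonoutlier : Prop := ∀ (outlier_flags : List Bool), Dom_first_and_last_nonoutlier outlier_flags → Spec_first_and_last_nonoutlier outlier_flags (first_and_last_nonoutlier outlier_flags)

-- ===== LEMMAS AND PROOFS =====

-- the list of non-outlier indices, the common yardstick for both ports
def pvIdx (l : List (Int × Bool)) : List Int :=
  l.filterMap (fun p => if !p.2 then some p.1 else none)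

-- A's fold, from an arbitrary accumulator, equals the endpoints of pvIdx.
theorem fold_char (l : List (Int × Bool)) (a b : Option Int) :
    l.foldl (fun s p => if !p.2 then
        ((match s.1 with | none => some p.1 | some x => some x), some p.1) else s) (a, b)
      = (a.or (pvIdx l).head?, ((pvIdx l).getLast?).or b) := by
  simp only [pvIdx]
  induction l generalizing a b with
  | nil => simp
  | cons x xs ih =>
    obtain ⟨i, f⟩ := x
    cases f with
    | true => simpa using ih a b
    | false =>
      simp only [List.foldl_cons, List.filterMap_cons]
      rw [ih]
      cases a <;> simp <;>
        cases h : (xs.filterMap (fun p => if !p.2 then some p.1 else none)).getLast? <;>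
        simp [List.getLast?_cons]

-- B's forward search finds the head of pvIdx.
theorem fwd_char (l : List Bool) (s : Int) :
    pvFwdFalse l s = (pvIdx (PySem.List.enumerate l s)).head? := by
  induction l generalizing s with
  | nil => simp [pvFwdFalse, pvIdx, PySem.List.enumerate_nil]
  | cons f rest ih =>
    cases f <;> simp [pvFwdFalse, pvIdx, PySem.List.enumerate_cons] <;>
      simpa [pvIdx] using ih (s + 1)

-- B's backward search finds the last element of pvIdx.
theorem bwd_char (l : List Bool) (s : Int) :
    pvBwdFalse l.reverse (s + l.length - 1) = (pvIdx (PySem.List.enumerate l s)).getLast? := by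
  induction l using List.reverseRecOn generalizing s with
  | nil => simp [pvBwdFalse, pvIdx, PySem.List.enumerate_nil]
  | append_singleton ys x ih =>
    rw [List.reverse_append]
    simp only [List.reverse_singleton, List.singleton_append, PySem.List.enumerate_append,
      PySem.List.enumerate_cons, PySem.List.enumerate_nil]
    cases x with
    | true =>
      simp only [pvBwdFalse, pvIdx, List.filterMap_append, List.filterMap_cons,
        List.filterMap_nil, Bool.not_true]
      simp only [List.length_append, List.length_singleton]
      have : (s : Int) + (ys.length + 1) - 1 - 1 = s + ys.length - 1 := by ring
      simp only [Nat.cast_add, Nat.cast_one]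
      rw [show s + ((ys.length : Int) + 1) - 1 - 1 = s + ys.length - 1 from by ring]
      simpa [pvIdx] using ih s
    | false =>
      simp only [pvBwdFalse, pvIdx, List.filterMap_append, List.filterMap_cons,
        List.filterMap_nil, Bool.not_false]
      simp [List.length_append]
      ring_nf

-- if the head search fails, pvIdx is empty, so the last is none too
theorem head_none_getLast_none {l : List Int} (h : l.head? = none) : l.getLast? = none := by
  cases l <;> simp_all

-- ===== VERDICT (by name: the statement is the Claim_ definition above) =====
theorem first_and_last_nonoutlier_spec : Claim_equal_first_and_last_nonoutlier := by
  intro flags _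
  unfold Spec_first_and_last_nonoutlier first_and_last_nonoutlier first_and_last_nonoutlier_alt
  rw [fold_char]
  have hf := fwd_char flags 0
  have hb := bwd_char flags 0
  rw [show (0 : Int) + flags.length - 1 = (flags.length : Int) - 1 from by ring] at hb
  cases h : pvFwdFalse flags 0 with
  | none =>
    rw [h] at hf
    simp [← hf, head_none_getLast_none hf.symm]
  | some v =>
    rw [h] at hf
    simp [← hf, ← hb]
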